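-- pv_equiv track=rewrite | github.com/robpitman1982-ux/python-master-strategy-creator | modules/hrp_clustering.py | cluster_size_violations
-- ===== SOURCE A (Python) =====
-- from typing import Iterable
--
-- def cluster_size_violations(
--     labels: Iterable[str],
--     cluster_map: dict[str, int],
--     max_per_cluster: int,
-- ) -> int:
--     """Count clusters in `labels` that exceed `max_per_cluster`.
--
--     Returns 0 if no violations. Used by `sweep_combinations` to reject
--     combinations that pile too many strategies into a single cluster.
--     """
--     if max_per_cluster <= 0:
--         return 0
--     counts: dict[int, int] = {}
--     for label in labels:
--         cid = cluster_map.get(label, -1)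
--         counts[cid] = counts.get(cid, 0) + 1
--     return sum(1 for v in counts.values() if v > max_per_cluster)
-- ===== SOURCE B (Python) =====
-- def cluster_size_violations(labels, cluster_map, max_per_cluster):
--     """Sort the mapped cluster ids once, then count runs longer than
--     max_per_cluster with a single run-length scan (no count dictionary)."""
--     if max_per_cluster <= 0:
--         return 0
--     cids = sorted(cluster_map.get(label, -1) for label in labels)
--     violations = 0
--     run_len = 0
--     prev = None
--     for c in cids:
--         if c == prev:
--             run_len += 1
--         else:
--             if run_len > max_per_cluster:
--                 violations += 1
--             prev = c
--             run_len = 1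
--     if run_len > max_per_cluster:
--         violations += 1
--     return violations
-- ===== Notes on version B (the rewrite author's own statement) =====
-- stated objective: alternative
-- what changed: B replaces A's dictionary of per-cluster frequencies by sorting the mapped cluster ids once and counting oversized runs with a single run-length scan over the sorted list.
import Mathlib
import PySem

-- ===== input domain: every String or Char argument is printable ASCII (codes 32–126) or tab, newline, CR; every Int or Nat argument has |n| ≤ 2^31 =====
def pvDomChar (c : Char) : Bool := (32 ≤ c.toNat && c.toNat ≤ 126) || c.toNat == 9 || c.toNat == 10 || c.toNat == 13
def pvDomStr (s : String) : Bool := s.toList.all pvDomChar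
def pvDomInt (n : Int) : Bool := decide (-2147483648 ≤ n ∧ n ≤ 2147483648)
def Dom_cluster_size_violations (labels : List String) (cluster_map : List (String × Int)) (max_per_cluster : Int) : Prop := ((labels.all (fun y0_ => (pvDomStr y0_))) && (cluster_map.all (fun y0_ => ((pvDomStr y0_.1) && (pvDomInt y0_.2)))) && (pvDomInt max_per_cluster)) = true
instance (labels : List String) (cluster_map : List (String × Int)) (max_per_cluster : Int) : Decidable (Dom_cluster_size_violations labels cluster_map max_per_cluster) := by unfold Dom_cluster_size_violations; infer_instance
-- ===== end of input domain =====

-- B sorts the mapped cluster ids once and counts oversized runs in a single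
-- run-length scan, instead of A's dictionary of per-cluster frequencies
-- (objective: alternative decomposition, same overall cost).

-- ===== PORT A =====
def cluster_size_violations (labels : List String) (cluster_map : List (String × Int)) (max_per_cluster : Int) : Int :=
  if max_per_cluster ≤ 0 then 0
  else
    let counts : PySem.Dict Int Int := labels.foldl (fun counts label =>
      let cid := (PySem.Dict.mk cluster_map).getD label (-1)
      counts.insert cid (counts.getD cid 0 + 1)) PySem.Dict.empty
    counts.values.foldl (fun acc v => if max_per_cluster < v then acc + 1 else acc) 0

-- ===== PORT B =====
-- one iteration of B's run-length loop: state = (violations, prev, run_len)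
def csvRunStep (max_per_cluster : Int) (st : Int × Option Int × Int) (c : Int) : Int × Option Int × Int :=
  if some c == st.2.1 then (st.1, st.2.1, st.2.2 + 1)
  else ((if max_per_cluster < st.2.2 then st.1 + 1 else st.1), some c, 1)

def cluster_size_violations_alt (labels : List String) (cluster_map : List (String × Int)) (max_per_cluster : Int) : Int :=
  if max_per_cluster ≤ 0 then 0
  else
    let cids := PySem.List.sorted (labels.map (fun label => (PySem.Dict.mk cluster_map).getD label (-1))) (fun x => x)
    let st := cids.foldl (csvRunStep max_per_cluster) (0, none, 0)
    if max_per_cluster < st.2.2 then st.1 + 1 else st.1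

-- ===== PRECONDITION & SPEC =====
def Spec_cluster_size_violations (labels : List String) (cluster_map : List (String × Int)) (max_per_cluster : Int) (out : Int) : Prop := out = cluster_size_violations_alt labels cluster_map max_per_cluster
instance (labels : List String) (cluster_map : List (String × Int)) (max_per_cluster : Int) (out : Int) : Decidable (Spec_cluster_size_violations labels cluster_map max_per_cluster out) := by unfold Spec_cluster_size_violations; infer_instance

-- ===== CLAIM (what is proved, stated in full; the proofs are below) =====
def Claim_equal_cluster_size_violations : Prop := ∀ (labels : List String) (cluster_map : List (String × Int)) (max_per_cluster : Int), Dom_cluster_size_violations labels cluster_map max_per_cluster → Spec_cluster_size_violations labels cluster_map max_per_cluster (cluster_size_violations labels cluster_map max_per_cluster)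

-- ===== LEMMAS AND PROOFS =====

-- canonical count of oversized clusters: distinct ids whose multiplicity exceeds m
def csvC (m : Int) (l : List Int) : Int :=
  ((List.countP (fun x => decide (m < (l.count x : Int))) (PySem.Set.ofList l) : Nat) : Int)

lemma csvC_nil (m : Int) : csvC m [] = 0 := by
  simp [csvC, show (PySem.Set.ofList ([] : List Int)) = [] from rfl]

-- peel off the first value together with all of its occurrences
lemma csvC_peel (m y : Int) (t : List Int) :
    csvC m (y :: t)
      = (if m < (t.count y : Int) + 1 then 1 else 0)
        + csvC m (t.filter (fun x => decide (x ≠ y))) := by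
  unfold csvC
  have hnd : (y :: PySem.Set.ofList (t.filter (fun x => decide (x ≠ y)))).Nodup := by
    refine List.nodup_cons.mpr ⟨?_, PySem.Set.nodup_ofList _⟩
    simp [PySem.Set.mem_ofList, List.mem_filter]
  have hperm : (PySem.Set.ofList (y :: t)).Perm
      (y :: PySem.Set.ofList (t.filter (fun x => decide (x ≠ y)))) := by
    rw [List.perm_ext_iff_of_nodup (PySem.Set.nodup_ofList _) hnd]
    intro a
    by_cases ha : a = y <;>
      simp [PySem.Set.mem_ofList, List.mem_filter, ha]
  rw [List.Perm.countP_eq _ hperm, List.countP_cons]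
  have hcongr : List.countP (fun x => decide (m < ((y :: t).count x : Int)))
      (PySem.Set.ofList (t.filter (fun x => decide (x ≠ y))))
      = List.countP (fun x => decide (m < ((t.filter (fun x => decide (x ≠ y))).count x : Int)))
      (PySem.Set.ofList (t.filter (fun x => decide (x ≠ y)))) := by
    refine List.countP_congr ?_
    intro x hx
    have hxy : x ≠ y := by
      have := (PySem.Set.mem_ofList _ _).mp hx
      have := (List.mem_filter.mp this).2
      simpa using this
    have h2 : (t.filter (fun x => decide (x ≠ y))).count x = t.count x :=
      List.count_filter (by simpa using hxy)
    rw [List.count_cons_of_ne (Ne.symm hxy), h2]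
  rw [hcongr, List.count_cons_self]
  push_cast
  by_cases hm : m < (t.count y : Int) + 1
  · simp [hm]; omega
  · simp [hm]

lemma csvC_perm (m : Int) {l l' : List Int} (hp : l.Perm l') : csvC m l = csvC m l' := by
  unfold csvC
  have hperm : (PySem.Set.ofList l).Perm (PySem.Set.ofList l') := by
    rw [List.perm_ext_iff_of_nodup (PySem.Set.nodup_ofList _) (PySem.Set.nodup_ofList _)]
    intro a; simp [PySem.Set.mem_ofList, hp.mem_iff]
  rw [List.Perm.countP_eq _ hperm]
  congr 1
  refine List.countP_congr ?_
  intro x _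
  simp [hp.count_eq]

-- invariant of B's run-length loop on a sorted remainder
lemma csv_runfold (m : Int) :
    ∀ (ys : List Int) (v c r : Int), ys.Pairwise (· ≤ ·) → (∀ y ∈ ys, c ≤ y) → 1 ≤ r →
    (let st := ys.foldl (csvRunStep m) (v, some c, r);
      if m < st.2.2 then st.1 + 1 else st.1)
      = v + (if m < r + (ys.count c : Int) then 1 else 0)
          + csvC m (ys.filter (fun x => decide (x ≠ c))) := by
  intro ys
  induction ys with
  | nil =>
    intro v c r _ _ _
    simp only [List.foldl_nil, List.count_nil, List.filter_nil, csvC_nil]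
    split_ifs <;> omega
  | cons y t ih =>
    intro v c r hp hmin hr
    have hpt : t.Pairwise (· ≤ ·) := (List.pairwise_cons.mp hp).2
    have hyt : ∀ z ∈ t, y ≤ z := (List.pairwise_cons.mp hp).1
    by_cases hyc : y = c
    · subst hyc
      have hstep : csvRunStep m (v, some y, r) y = (v, some y, r + 1) := by
        simp [csvRunStep]
      rw [List.foldl_cons, hstep, ih v y (r + 1) hpt hyt (by omega)]
      rw [List.count_cons_self, List.filter_cons_of_neg (by simp)]
      push_cast
      split_ifs <;> omega
    · have hcy : c < y := lt_of_le_of_ne (hmin y (by simp)) (fun h => hyc h.symm)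
      have hstep : csvRunStep m (v, some c, r) y
          = ((if m < r then v + 1 else v), some y, 1) := by
        simp [csvRunStep, hyc]
      have hct : c ∉ t := fun hmem => absurd (hyt c hmem) (by omega)
      have hcc : (y :: t).count c = 0 := by
        refine List.count_eq_zero.mpr ?_
        intro hmem
        rcases List.mem_cons.mp hmem with h' | h'
        · exact hyc h'.symm
        · exact hct h'
      have hfil : (y :: t).filter (fun x => decide (x ≠ c)) = y :: t := by
        refine List.filter_eq_self.mpr ?_
        intro z hz
        rcases List.mem_cons.mp hz with h' | h'
        · subst h'; simpa using fun e => hyc e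
        · have hlt : c < z := lt_of_lt_of_le hcy (hyt z h')
          simpa using (by omega : z ≠ c)
      rw [List.foldl_cons, hstep, ih (if m < r then v + 1 else v) y 1 hpt hyt le_rfl]
      rw [hcc, hfil, csvC_peel]
      push_cast
      split_ifs <;> omega

lemma cluster_A_eq_csvC (labels : List String) (cluster_map : List (String × Int)) (m : Int)
    (h : ¬ m ≤ 0) :
    cluster_size_violations labels cluster_map m
      = csvC m (labels.map (fun label => (PySem.Dict.mk cluster_map).getD label (-1))) := by
  simp only [cluster_size_violations, if_neg h]
  rw [show (labels.foldl (fun counts label =>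
        let cid := (PySem.Dict.mk cluster_map).getD label (-1)
        counts.insert cid (counts.getD cid 0 + 1)) PySem.Dict.empty)
      = PySem.Dict.counter (labels.map (fun label => (PySem.Dict.mk cluster_map).getD label (-1))) from by
    rw [← PySem.Dict.foldl_insert_getD_add_one_eq_counter, List.foldl_map]]
  rw [show (PySem.Dict.counter (labels.map (fun label => (PySem.Dict.mk cluster_map).getD label (-1)))).values
      = (PySem.Set.ofList (labels.map (fun label => (PySem.Dict.mk cluster_map).getD label (-1)))).map
          (fun k => ((labels.map (fun label => (PySem.Dict.mk cluster_map).getD label (-1))).count k : Int)) from by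
    simp only [PySem.Dict.values, PySem.Dict.items_counter, List.map_map]; rfl]
  rw [PySem.List.foldl_ite_add_one (fun v => m < v)]
  rw [List.countP_map]
  unfold csvC
  simp only [Function.comp_def]
  omega

lemma csv_runfold_top (m : Int) (h : ¬ m ≤ 0) (ys : List Int) (hp : ys.Pairwise (· ≤ ·)) :
    (let st := ys.foldl (csvRunStep m) (0, none, 0);
      if m < st.2.2 then st.1 + 1 else st.1) = csvC m ys := by
  cases ys with
  | nil =>
    simp only [List.foldl_nil, csvC_nil]
    rw [if_neg (by omega : ¬ m < (0 : Int))]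
  | cons y t =>
    have hpt : t.Pairwise (· ≤ ·) := (List.pairwise_cons.mp hp).2
    have hyt : ∀ z ∈ t, y ≤ z := (List.pairwise_cons.mp hp).1
    have hstep : csvRunStep m (0, none, 0) y = (0, some y, 1) := by
      simp [csvRunStep, show ¬ (m < 0) by omega]
    simp only [List.foldl_cons, hstep]
    rw [csv_runfold m t 0 y 1 hpt hyt le_rfl, csvC_peel]
    split_ifs <;> omega

lemma cluster_B_eq_csvC (labels : List String) (cluster_map : List (String × Int)) (m : Int)
    (h : ¬ m ≤ 0) :
    cluster_size_violations_alt labels cluster_map m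
      = csvC m (PySem.List.sorted (labels.map (fun label => (PySem.Dict.mk cluster_map).getD label (-1))) (fun x => x)) := by
  simp only [cluster_size_violations_alt, if_neg h]
  exact csv_runfold_top m h _
    (PySem.List.sorted_pairwise (labels.map (fun label => (PySem.Dict.mk cluster_map).getD label (-1))) (fun x => x))

-- ===== VERDICT (by name: the statement is the Claim_ definition above) =====
theorem cluster_size_violations_spec : Claim_equal_cluster_size_violations := by
  intro labels cluster_map m _
  unfold Spec_cluster_size_violations
  by_cases h : m ≤ 0
  · simp [cluster_size_violations, cluster_size_violations_alt, if_pos h]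
  · rw [cluster_A_eq_csvC labels cluster_map m h, cluster_B_eq_csvC labels cluster_map m h]
    exact csvC_perm m (PySem.List.sorted_perm _ _ _).symm
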